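-- pv_equiv track=rewrite | github.com/ZhenHuangLab/Arona | backend/utils/env_file.py | _format_env_value
-- ===== SOURCE A (Python) =====
-- def _format_env_value(value: str) -> str:
--     """Format a value for a .env file line, quoting if needed."""
--     if value is None:
--         raise ValueError("env value must not be None")
--
--     # Preserve empty string as KEY=
--     if value == "":
--         return ""
--
--     # Quote if contains whitespace or comment-ish characters
--     needs_quotes = any(ch.isspace() for ch in value) or "#" in value or value.startswith('"') or value.endswith('"')
--     if not needs_quotes and "\n" not in value and "\r" not in value:
--         return value
--
--     escaped = value.replace("\\", "\\\\").replace('"', '\\"')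
--     escaped = escaped.replace("\n", "\\n").replace("\r", "\\r")
--     return f'"{escaped}"'
-- ===== SOURCE B (Python) =====
-- _ESC = {'\\': '\\\\', '"': '\\"', '\n': '\\n', '\r': '\\r'}
--
-- def _format_env_value(value: str) -> str:
--     """Format a value for a .env file line: one pass builds the escaped text
--     while flagging whitespace/# characters; quote edges are checked directly."""
--     if value is None:
--         raise ValueError("env value must not be None")
--     if not value:
--         return ""
--     special = False
--     out = []
--     for ch in value:
--         if ch.isspace() or ch == '#':
--             special = True
--         out.append(_ESC.get(ch, ch))
--     if special or value[0] == '"' or value[-1] == '"':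
--         return '"' + ''.join(out) + '"'
--     return value
-- ===== Notes on version B (the rewrite author's own statement) =====
-- stated objective: alternative
-- what changed: A scans the string with any() plus three membership/edge checks and then runs four full .replace() passes; B makes one pass over the characters, building the escaped text and the whitespace/# flag simultaneously, checking the quote edges directly.
import Mathlib
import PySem

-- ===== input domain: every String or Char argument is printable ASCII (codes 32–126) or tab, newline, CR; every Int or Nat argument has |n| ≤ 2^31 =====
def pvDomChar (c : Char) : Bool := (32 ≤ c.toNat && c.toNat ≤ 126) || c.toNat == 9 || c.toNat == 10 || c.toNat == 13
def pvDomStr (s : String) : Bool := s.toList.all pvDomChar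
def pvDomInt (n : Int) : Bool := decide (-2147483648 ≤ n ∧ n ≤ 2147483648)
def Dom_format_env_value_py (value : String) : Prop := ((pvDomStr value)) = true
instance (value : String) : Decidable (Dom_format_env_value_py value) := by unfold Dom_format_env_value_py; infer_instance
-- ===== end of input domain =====

-- B replaces A's any()-scan plus four .replace() passes by a single traversal that
-- builds the escaped text and the whitespace/# flag at once (objective: alternative decomposition).
-- The Python-level None check is outside the String type and is not modelled.

-- ===== PORT A =====
def format_env_value_py (value : String) : String :=
  if value = "" then "" else
  let needs_quotes := value.toList.any PySem.Chars.isspace || PySem.Str.isIn "#" value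
      || PySem.Str.startswith value "\"" || PySem.Str.endswith value "\""
  if !needs_quotes && !(PySem.Str.isIn "\n" value) && !(PySem.Str.isIn "\r" value) then value
  else
    let escaped := PySem.Str.replace (PySem.Str.replace value "\\" "\\\\") "\"" "\\\""
    let escaped := PySem.Str.replace (PySem.Str.replace escaped "\n" "\\n") "\r" "\\r"
    String.ofList ('"' :: escaped.toList ++ ['"'])

-- ===== PORT B =====
-- the _ESC table of Source B, as a per-character function
def pvEsc (c : Char) : List Char :=
  if c = '\\' then ['\\', '\\']
  else if c = '"' then ['\\', '"']
  else if c = '\n' then ['\\', 'n']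
  else if c = '\r' then ['\\', 'r']
  else [c]

def format_env_value_py_alt (value : String) : String :=
  let cs := value.toList
  if cs = [] then "" else
  let r := cs.foldl (fun (st : Bool × List Char) c =>
      (st.1 || (PySem.Chars.isspace c || c == '#'), st.2 ++ pvEsc c)) (false, [])
  if r.1 || (PySem.List.pyGet? cs 0 == some '"') || (PySem.List.pyGet? cs (-1) == some '"')
  then String.ofList ('"' :: r.2 ++ ['"'])
  else value

-- ===== PRECONDITION & SPEC =====
def Spec_format_env_value_py (value : String) (out : String) : Prop := out = format_env_value_py_alt value
instance (value : String) (out : String) : Decidable (Spec_format_env_value_py value out) := by unfold Spec_format_env_value_py; infer_instance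

-- ===== CLAIM (what is proved, stated in full; the proofs are below) =====
def Claim_equal_format_env_value_py : Prop := ∀ (value : String), Dom_format_env_value_py value → Spec_format_env_value_py value (format_env_value_py value)

-- ===== LEMMAS AND PROOFS =====

-- replace with a single-character pattern is a per-character flatMap
theorem pv_replace_go_single (o : Char) (new : List Char) :
    ∀ (l acc : List Char) (fuel : Nat), l.length ≤ fuel →
      PySem.Chars.replace.go [o] new fuel l acc
        = acc.reverse ++ l.flatMap (fun c => if c = o then new else [c]) := by
  intro l
  induction l with
  | nil =>
      intro acc fuel _
      cases fuel <;> simp [PySem.Chars.replace.go]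
  | cons c t ih =>
      intro acc fuel hf
      cases fuel with
      | zero => simp at hf
      | succ n =>
          by_cases hc : c = o
          · subst hc
            have hpre : List.isPrefixOf [c] (c :: t) = true := by
              simp [List.isPrefixOf]
            have hdrop : List.drop [c].length (c :: t) = t := by simp
            simp only [PySem.Chars.replace.go, hpre, if_pos, hdrop]
            rw [ih (new.reverse ++ acc) n (by simp at hf; omega)]
            simp
          · have hpre : List.isPrefixOf [o] (c :: t) = false := by
              simp [List.isPrefixOf]
              intro h; exact absurd h.symm hc
            simp only [PySem.Chars.replace.go, hpre, Bool.false_eq_true, if_neg,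
              not_false_iff]
            rw [ih (c :: acc) n (by simp at hf; omega)]
            simp [hc]

theorem pv_replace_single (s : List Char) (o : Char) (new : List Char) :
    PySem.Chars.replace s [o] new = s.flatMap (fun c => if c = o then new else [c]) := by
  have := pv_replace_go_single o new s [] s.length le_rfl
  simpa [PySem.Chars.replace] using this

theorem pv_flatMap_comp {α : Type} (f g : α → List α) (l : List α) :
    (l.flatMap f).flatMap g = l.flatMap (fun x => (f x).flatMap g) := by
  induction l with
  | nil => simp
  | cons x t ih => simp [List.flatMap_cons, ih]

-- the four replace passes of A compose to the per-character escape of B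
theorem pv_replace_chain_eq_flatMap (cs : List Char) :
    PySem.Chars.replace (PySem.Chars.replace
      (PySem.Chars.replace (PySem.Chars.replace cs ['\\'] ['\\','\\']) ['"'] ['\\','"'])
      ['\n'] ['\\','n']) ['\r'] ['\\','r'] = cs.flatMap pvEsc := by
  simp only [pv_replace_single, pv_flatMap_comp]
  apply List.flatMap_congr
  intro c _
  by_cases h1 : c = '\\'
  · subst h1; decide
  · by_cases h2 : c = '"'
    · subst h2; decide
    · by_cases h3 : c = '\n'
      · subst h3; decide
      · by_cases h4 : c = '\r'
        · subst h4; decide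
        · simp [pvEsc, h1, h2, h3, h4]

-- accumulate-or over a list is any
theorem pv_foldl_or_any {α : Type} (p : α → Bool) :
    ∀ (l : List α) (b : Bool), l.foldl (fun a c => a || p c) b = (b || l.any p) := by
  intro l
  induction l with
  | nil => simp
  | cons x t ih => intro b; rw [List.foldl_cons, ih, List.any_cons, Bool.or_assoc]

theorem pv_any_or {α : Type} (p q : α → Bool) (l : List α) :
    l.any (fun c => p c || q c) = (l.any p || l.any q) := by
  induction l with
  | nil => simp
  | cons x t ih =>
      simp only [List.any_cons, ih]
      cases p x <;> cases q x <;> simp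

theorem pv_infix_singleton_iff (a : Char) (l : List Char) : [a] <:+: l ↔ a ∈ l := by
  constructor
  · intro h; exact h.sublist.subset (by simp)
  · intro h
    obtain ⟨s, t, rfl⟩ := List.append_of_mem h
    exact ⟨s, t, by simp⟩

theorem pv_suffix_singleton (a x : Char) (xs : List Char) : [a] <:+ xs ++ [x] ↔ a = x := by
  constructor
  · rintro ⟨s, hs⟩
    have h := congrArg List.getLast? hs
    simpa using h
  · rintro rfl; exact ⟨xs, rfl⟩

theorem pv_hash_any_eq (cs : List Char) :
    cs.any (fun c => c == '#') = PySem.Chars.isIn ['#'] cs := by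
  rw [Bool.eq_iff_iff]
  simp [List.any_eq_true, PySem.Chars.isIn_iff_infix, pv_infix_singleton_iff]

theorem pv_head_eq (cs : List Char) (h : cs ≠ []) :
    (PySem.List.pyGet? cs 0 == some '"') = PySem.Chars.startswith cs ['"'] := by
  cases cs with
  | nil => exact absurd rfl h
  | cons a t =>
      rw [Bool.eq_iff_iff]
      simp [PySem.Chars.startswith_iff, List.cons_prefix_cons]
      exact eq_comm

theorem pv_last_eq (cs : List Char) (h : cs ≠ []) :
    (PySem.List.pyGet? cs (-1) == some '"') = PySem.Chars.endswith cs ['"'] := by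
  obtain ⟨xs, x, hx⟩ := (List.eq_nil_or_concat cs).resolve_left h
  subst hx
  rw [Bool.eq_iff_iff]
  simp [PySem.List.pyGet?_neg_one_append_singleton, PySem.Chars.endswith_iff,
    pv_suffix_singleton]
  exact eq_comm

-- the quoting conditions of A and B agree on a nonempty list
theorem pv_cond_eq (cs : List Char) (h : cs ≠ []) :
    (cs.any (fun c => PySem.Chars.isspace c || c == '#')
      || (PySem.List.pyGet? cs 0 == some '"') || (PySem.List.pyGet? cs (-1) == some '"'))
    = (cs.any PySem.Chars.isspace || PySem.Chars.isIn ['#'] cs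
      || PySem.Chars.startswith cs ['"'] || PySem.Chars.endswith cs ['"']) := by
  rw [pv_any_or, pv_head_eq cs h, pv_last_eq cs h, pv_hash_any_eq]

-- no whitespace at all means in particular no '\n' and no '\r'
theorem pv_no_nl (cs : List Char) (h : cs.any PySem.Chars.isspace = false) :
    PySem.Chars.isIn ['\n'] cs = false ∧ PySem.Chars.isIn ['\r'] cs = false := by
  have hm := List.any_eq_false.mp h
  constructor <;>
  · apply Bool.eq_false_iff.mpr
    intro htrue
    have hinf := (PySem.Chars.isIn_iff_infix _ _).mp htrue
    exact absurd (by decide) (hm _ ((pv_infix_singleton_iff _ _).mp hinf))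

-- ===== VERDICT (by name: the statement is the Claim_ definition above) =====
theorem format_env_value_py_spec : Claim_equal_format_env_value_py := by
  intro value _
  unfold Spec_format_env_value_py format_env_value_py format_env_value_py_alt
  by_cases hemp : value = ""
  · subst hemp; simp
  · have hcs : value.toList ≠ [] := by
      intro h; apply hemp
      have h2 := congrArg String.ofList h
      simpa using h2
    simp only [if_neg hemp, if_neg hcs]
    rw [PySem.List.foldl_prod_mk (fun (a : Bool) (c : Char) => a || (PySem.Chars.isspace c || c == '#'))
        (fun (l : List Char) (c : Char) => l ++ pvEsc c) value.toList false []]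
    dsimp only
    rw [pv_foldl_or_any (fun c => PySem.Chars.isspace c || c == '#') value.toList false,
      PySem.List.foldl_append_eq_flatMap pvEsc value.toList []]
    simp only [Bool.false_or, List.nil_append]
    rw [pv_cond_eq value.toList hcs]
    have t1 : ("#" : String).toList = ['#'] := by decide
    have t2 : ("\"" : String).toList = ['"'] := by decide
    have t3 : ("\n" : String).toList = ['\n'] := by decide
    have t4 : ("\r" : String).toList = ['\r'] := by decide
    have t5 : ("\\" : String).toList = ['\\'] := by decide
    have t6 : ("\\\\" : String).toList = ['\\','\\'] := by decide
    have t7 : ("\\\"" : String).toList = ['\\','"'] := by decide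
    have t8 : ("\\n" : String).toList = ['\\','n'] := by decide
    have t9 : ("\\r" : String).toList = ['\\','r'] := by decide
    simp only [PySem.Str.isIn_eq, PySem.Str.startswith_eq, PySem.Str.endswith_eq,
      PySem.Str.toList_replace, t1, t2, t3, t4, t5, t6, t7, t8, t9]
    by_cases hq : (value.toList.any PySem.Chars.isspace || PySem.Chars.isIn ['#'] value.toList
        || PySem.Chars.startswith value.toList ['"'] || PySem.Chars.endswith value.toList ['"']) = true
    · rw [hq]
      simp only [Bool.not_true, Bool.false_and, Bool.false_eq_true, if_false]
      rw [pv_replace_chain_eq_flatMap]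
      simp
    · have hq' := Bool.eq_false_iff.mpr hq
      simp only [Bool.or_eq_false_iff] at hq'
      obtain ⟨⟨⟨hP, _⟩, _⟩, _⟩ := hq'
      obtain ⟨hN, hR⟩ := pv_no_nl value.toList hP
      rw [Bool.eq_false_iff.mpr hq]
      simp [hN, hR]
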